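-- pv_equiv track=rewrite | github.com/aiaiaikkk/super-prompt-canvas | nodes/kontext_grammar_patterns.py | _extract_semantic_roles
-- ===== SOURCE A (Python) =====
-- from typing import Dict, List, Tuple, Optional, Set
--
-- def _extract_semantic_roles(instruction: str) -> Dict:
--     """提取语义角色"""
--     roles = {"agent": None, "patient": None, "goal": None, "instrument": None, "location": None}
--
--     # 简化的语义角色提取
--     words = instruction.lower().split()
--
--     # 查找patient (通常是第一个名词)
--     for word in words:
--         if word in ["cat", "dog", "man", "woman", "car", "text", "image"]:
--             roles["patient"] = word
--             break
--
--     # 查找goal (通常在"to", "into"之后)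
--     for i, word in enumerate(words):
--         if word in ["to", "into"] and i + 1 < len(words):
--             roles["goal"] = words[i + 1]
--             break
--
--     # 查找location (介词短语)
--     for i, word in enumerate(words):
--         if word in ["on", "in", "at", "above", "below"] and i + 1 < len(words):
--             roles["location"] = f"{word} {words[i + 1]}"
--             break
--
--     return {k: v for k, v in roles.items() if v is not None}
-- ===== SOURCE B (Python) =====
-- NOUNS = {"cat", "dog", "man", "woman", "car", "text", "image"}
-- PREPS = {"on", "in", "at", "above", "below"}
--
-- def _extract_semantic_roles(instruction: str):
--     """Single indexed pass over the words instead of three separate scans."""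
--     patient = goal = location = None
--     words = instruction.lower().split()
--     for i, word in enumerate(words):
--         if patient is None and word in NOUNS:
--             patient = word
--         if i + 1 < len(words):
--             if goal is None and word in ("to", "into"):
--                 goal = words[i + 1]
--             if location is None and word in PREPS:
--                 location = f"{word} {words[i + 1]}"
--         if patient is not None and goal is not None and location is not None:
--             break
--     result = {}
--     if patient is not None:
--         result["patient"] = patient
--     if goal is not None:
--         result["goal"] = goal
--     if location is not None:
--         result["location"] = location
--     return result
-- ===== Notes on version B (the rewrite author's own statement) =====
-- stated objective: alternative
-- what changed: A's three separate first-match scans over the word list (patient, goal, location) are fused into one indexed pass that fills each still-unset role and breaks early once all three are set; the final None-filter becomes direct conditional appends.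
import Mathlib
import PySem

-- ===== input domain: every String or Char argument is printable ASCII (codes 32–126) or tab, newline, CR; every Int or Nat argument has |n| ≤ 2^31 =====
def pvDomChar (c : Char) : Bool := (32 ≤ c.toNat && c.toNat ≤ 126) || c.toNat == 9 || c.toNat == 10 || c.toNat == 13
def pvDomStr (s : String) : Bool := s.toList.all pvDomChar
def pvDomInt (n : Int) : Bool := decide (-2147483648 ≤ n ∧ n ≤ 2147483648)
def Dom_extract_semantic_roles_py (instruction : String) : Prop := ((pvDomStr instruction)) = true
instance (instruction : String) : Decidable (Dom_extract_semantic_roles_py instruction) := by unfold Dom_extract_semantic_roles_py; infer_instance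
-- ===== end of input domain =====

-- B replaces A's three separate first-match scans by one indexed pass; objective: alternative (same cost, single traversal).

-- ===== PORT A =====
-- A: three independent loops, each a first-match scan, then the dict comprehension
-- {k: v for k, v in roles.items() if v is not None} (agent/instrument are never set,
-- so insertion order yields patient, goal, location).

def pvNouns : List String := ["cat", "dog", "man", "woman", "car", "text", "image"]
def pvGoalWords : List String := ["to", "into"]
def pvPreps : List String := ["on", "in", "at", "above", "below"]

-- loop 1: first noun
def pvFindPatient : List String → Option String
  | [] => none
  | w :: ws => if w ∈ pvNouns then some w else pvFindPatient ws

-- loop 2: first "to"/"into" with a following word (i+1 < len means a next word exists)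
def pvFindGoal : List String → Option String
  | w :: n :: ws => if w ∈ pvGoalWords then some n else pvFindGoal (n :: ws)
  | _ => none

-- loop 3: first preposition with a following word
def pvFindLocation : List String → Option String
  | w :: n :: ws => if w ∈ pvPreps then some (w ++ " " ++ n) else pvFindLocation (n :: ws)
  | _ => none

-- the filtered dict, in roles' insertion order
def pvAssembleA (p g l : Option String) : List (String × String) :=
  (match p with | some v => [("patient", v)] | none => []) ++
  (match g with | some v => [("goal", v)] | none => []) ++
  (match l with | some v => [("location", v)] | none => [])

def extract_semantic_roles_py (instruction : String) : List (String × String) :=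
  let words := PySem.Str.split₀ (PySem.Str.lower instruction)
  pvAssembleA (pvFindPatient words) (pvFindGoal words) (pvFindLocation words)

-- ===== PORT B =====
-- B: one indexed pass; the lookahead words[i+1] is the head of the tail.

def pvLoopB : List String → Option String → Option String → Option String →
    Option String × Option String × Option String
  | [], p, g, l => (p, g, l)
  | w :: rest, p, g, l =>
    let p' := if p = none ∧ w ∈ pvNouns then some w else p
    let g' := if g = none ∧ w ∈ pvGoalWords ∧ rest ≠ [] then rest.head? else g
    let l' := if l = none ∧ w ∈ pvPreps ∧ rest ≠ [] then rest.head?.map (fun n => w ++ " " ++ n) else l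
    if p' ≠ none ∧ g' ≠ none ∧ l' ≠ none then (p', g', l')
    else pvLoopB rest p' g' l'

def pvAssembleB (p g l : Option String) : List (String × String) :=
  (p.map (fun v => ("patient", v))).toList ++
  (g.map (fun v => ("goal", v))).toList ++
  (l.map (fun v => ("location", v))).toList

def extract_semantic_roles_py_alt (instruction : String) : List (String × String) :=
  let words := PySem.Str.split₀ (PySem.Str.lower instruction)
  let (p, g, l) := pvLoopB words none none none
  pvAssembleB p g l

-- ===== PRECONDITION & SPEC =====
def Spec_extract_semantic_roles_py (instruction : String) (out : List (String × String)) : Prop := out = extract_semantic_roles_py_alt instruction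
instance (instruction : String) (out : List (String × String)) : Decidable (Spec_extract_semantic_roles_py instruction out) := by unfold Spec_extract_semantic_roles_py; infer_instance

-- ===== CLAIM (what is proved, stated in full; the proofs are below) =====
def Claim_equal_extract_semantic_roles_py : Prop := ∀ (instruction : String), Dom_extract_semantic_roles_py instruction → Spec_extract_semantic_roles_py instruction (extract_semantic_roles_py instruction)

-- ===== LEMMAS AND PROOFS =====

-- the fused pass computes exactly the three first-match scans, generalized over the accumulators
theorem pvLoopB_eq (ws : List String) : ∀ (p g l : Option String),
    pvLoopB ws p g l = (p.or (pvFindPatient ws), g.or (pvFindGoal ws), l.or (pvFindLocation ws)) := by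
  induction ws with
  | nil =>
    intro p g l
    simp [pvLoopB, pvFindPatient, pvFindGoal, pvFindLocation]
  | cons w rest ih =>
    intro p g l
    simp only [pvLoopB]
    -- the three updated accumulators
    have hP : (if p = none ∧ w ∈ pvNouns then some w else p).or (pvFindPatient rest)
        = p.or (pvFindPatient (w :: rest)) := by
      cases p with
      | some v => simp
      | none => by_cases hn : w ∈ pvNouns <;> simp [pvFindPatient, hn]
    have hG : (if g = none ∧ w ∈ pvGoalWords ∧ rest ≠ [] then rest.head? else g).or (pvFindGoal rest)
        = g.or (pvFindGoal (w :: rest)) := by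
      cases g with
      | some v => simp
      | none =>
        cases rest with
        | nil => simp [pvFindGoal]
        | cons n rs => by_cases hw : w ∈ pvGoalWords <;> simp [pvFindGoal, hw]
    have hL : (if l = none ∧ w ∈ pvPreps ∧ rest ≠ [] then rest.head?.map (fun n => w ++ " " ++ n) else l).or
          (pvFindLocation rest)
        = l.or (pvFindLocation (w :: rest)) := by
      cases l with
      | some v => simp
      | none =>
        cases rest with
        | nil => simp [pvFindLocation]
        | cons n rs => by_cases hw : w ∈ pvPreps <;> simp [pvFindLocation, hw]
    set p' := (if p = none ∧ w ∈ pvNouns then some w else p) with hp'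
    set g' := (if g = none ∧ w ∈ pvGoalWords ∧ rest ≠ [] then rest.head? else g) with hg'
    set l' := (if l = none ∧ w ∈ pvPreps ∧ rest ≠ [] then rest.head?.map (fun n => w ++ " " ++ n) else l) with hl'
    rw [← hP, ← hG, ← hL]
    split_ifs with h
    · -- early break: all three accumulators are already some, so .or changes nothing
      obtain ⟨hp, hg, hl⟩ := h
      obtain ⟨a, ha⟩ := Option.ne_none_iff_exists'.mp hp
      obtain ⟨b, hb⟩ := Option.ne_none_iff_exists'.mp hg
      obtain ⟨c, hc⟩ := Option.ne_none_iff_exists'.mp hl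
      simp [ha, hb, hc]
    · exact ih _ _ _

theorem pvAssemble_eq (p g l : Option String) : pvAssembleA p g l = pvAssembleB p g l := by
  cases p <;> cases g <;> cases l <;> rfl

-- ===== VERDICT (by name: the statement is the Claim_ definition above) =====
theorem extract_semantic_roles_py_spec : Claim_equal_extract_semantic_roles_py := by
  intro instruction _
  unfold Spec_extract_semantic_roles_py extract_semantic_roles_py extract_semantic_roles_py_alt
  simp only [pvLoopB_eq, Option.none_or]
  exact pvAssemble_eq _ _ _
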